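-- pv_equiv track=rewrite | github.com/AayushKolharkar/DeepDive | cnn_visualizer/ui/channel_filter_window.py | _filter_to_text
-- ===== SOURCE A (Python) =====
-- def _filter_to_text(filter_set: set[int] | None, num_channels: int) -> str:
--     """Convert a filter set back to a compact range string."""
--     if filter_set is None or len(filter_set) == num_channels:
--         return ""
--     indices = sorted(filter_set)
--     if not indices:
--         return ""
--     parts = []
--     start = indices[0]
--     end   = indices[0]
--     for idx in indices[1:]:
--         if idx == end + 1:
--             end = idx
--         else:
--             parts.append(f"{start}-{end}" if end > start else str(start))
--             start = end = idx
--     parts.append(f"{start}-{end}" if end > start else str(start))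
--     return ", ".join(parts)
-- ===== SOURCE B (Python) =====
-- def _filter_to_text(filter_set, num_channels):
--     """Convert a filter set back to a compact range string."""
--     if filter_set is None or len(filter_set) == num_channels:
--         return ""
--     indices = sorted(filter_set)
--     if not indices:
--         return ""
--     # boundary extraction: a run breaks between a and b exactly when b != a + 1
--     pairs = list(zip(indices, indices[1:]))
--     starts = [indices[0]] + [b for a, b in pairs if b != a + 1]
--     ends = [a for a, b in pairs if b != a + 1] + [indices[-1]]
--     return ", ".join(f"{s}-{e}" if e > s else str(s) for s, e in zip(starts, ends))
-- ===== Notes on version B (the rewrite author's own statement) =====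
-- stated objective: alternative
-- what changed: Replaces the stateful start/end accumulator loop by boundary extraction: zip the sorted list with its shifted self, collect run starts and run ends as two comprehensions over the adjacent pairs, and zip them into the parts.
import Mathlib
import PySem

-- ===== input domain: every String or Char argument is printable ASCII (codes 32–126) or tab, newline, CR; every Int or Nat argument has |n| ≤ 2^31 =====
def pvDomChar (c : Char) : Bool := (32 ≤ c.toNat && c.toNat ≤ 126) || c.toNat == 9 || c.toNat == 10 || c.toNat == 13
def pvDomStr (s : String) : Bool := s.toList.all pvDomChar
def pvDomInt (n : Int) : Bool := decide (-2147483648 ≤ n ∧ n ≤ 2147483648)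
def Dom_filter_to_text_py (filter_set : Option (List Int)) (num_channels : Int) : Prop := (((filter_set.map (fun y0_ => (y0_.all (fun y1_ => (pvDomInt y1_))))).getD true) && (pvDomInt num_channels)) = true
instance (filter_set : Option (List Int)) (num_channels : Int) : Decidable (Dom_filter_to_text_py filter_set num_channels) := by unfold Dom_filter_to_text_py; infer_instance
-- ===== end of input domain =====

-- B extracts run boundaries from zipped adjacent pairs instead of A's stateful start/end loop; objective: alternative decomposition, same cost.

-- ===== PORT A =====
-- f"{start}-{end}" if end > start else str(start)   (shared formatting expression of both Pythons)
def pvFmt (s e : Int) : String :=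
  if e > s then PySem.Int.toStr s ++ "-" ++ PySem.Int.toStr e else PySem.Int.toStr s

-- the 'for idx in indices[1:]' loop with state (parts, start, end), including the trailing append
def pvLoopA : List Int → List String → Int → Int → List String
  | [], parts, s, e => parts ++ [pvFmt s e]
  | x :: xs, parts, s, e =>
    if x = e + 1 then pvLoopA xs parts s x
    else pvLoopA xs (parts ++ [pvFmt s e]) x x

def filter_to_text_py (filter_set : Option (List Int)) (num_channels : Int) : String :=
  match filter_set with
  | none => ""
  | some fs =>
    if (fs.length : Int) = num_channels then ""
    else
      match PySem.List.sorted fs (fun x => x) false with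
      | [] => ""
      | h :: t => PySem.Str.join ", " (pvLoopA t [] h h)

-- ===== PORT B =====
def filter_to_text_py_alt (filter_set : Option (List Int)) (num_channels : Int) : String :=
  match filter_set with
  | none => ""
  | some fs =>
    if (fs.length : Int) = num_channels then ""
    else
      match PySem.List.sorted fs (fun x => x) false with
      | [] => ""
      | h :: t =>
        -- pairs = zip(indices, indices[1:])
        let pairs := (h :: t).zip t
        let starts := h :: pairs.filterMap (fun p => if p.2 ≠ p.1 + 1 then some p.2 else none)
        let ends := pairs.filterMap (fun p => if p.2 ≠ p.1 + 1 then some p.1 else none) ++ [(h :: t).getLast (by simp)]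
        PySem.Str.join ", " (List.zipWith pvFmt starts ends)

-- ===== PRECONDITION & SPEC =====
def Spec_filter_to_text_py (filter_set : Option (List Int)) (num_channels : Int) (out : String) : Prop := out = filter_to_text_py_alt filter_set num_channels
instance (filter_set : Option (List Int)) (num_channels : Int) (out : String) : Decidable (Spec_filter_to_text_py filter_set num_channels out) := by unfold Spec_filter_to_text_py; infer_instance

-- ===== CLAIM (what is proved, stated in full; the proofs are below) =====
def Claim_equal_filter_to_text_py : Prop := ∀ (filter_set : Option (List Int)) (num_channels : Int), Dom_filter_to_text_py filter_set num_channels → Spec_filter_to_text_py filter_set num_channels (filter_to_text_py filter_set num_channels)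

-- ===== LEMMAS AND PROOFS =====

-- A's loop equals B's boundary-extraction construction, for any state (s, e) and accumulator.
theorem pvLoopA_eq_boundaries (xs : List Int) : ∀ (parts : List String) (s e : Int),
    pvLoopA xs parts s e =
      parts ++ List.zipWith pvFmt
        (s :: ((e :: xs).zip xs).filterMap (fun p => if p.2 ≠ p.1 + 1 then some p.2 else none))
        (((e :: xs).zip xs).filterMap (fun p => if p.2 ≠ p.1 + 1 then some p.1 else none)
          ++ [(e :: xs).getLast (by simp)]) := by
  induction xs with
  | nil => intro parts s e; simp [pvLoopA]
  | cons x xs ih =>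
    intro parts s e
    by_cases hx : x = e + 1
    · subst hx
      simp [pvLoopA, ih parts s (e + 1), List.getLast_cons]
    · simp only [pvLoopA, if_neg hx, ih (parts ++ [pvFmt s e]) x x]
      simp [List.getLast_cons, hx, List.append_assoc]

theorem filter_to_text_py_spec : Claim_equal_filter_to_text_py := by
  intro filter_set num_channels _
  unfold Spec_filter_to_text_py filter_to_text_py filter_to_text_py_alt
  match filter_set with
  | none => rfl
  | some fs =>
    simp only
    split
    · rfl
    · cases hs : PySem.List.sorted fs (fun x => x) false with
      | nil => rfl
      | cons h t => simp [pvLoopA_eq_boundaries t [] h h]
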